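-- pv_equiv track=rewrite | github.com/Yasasrm/PRG600 | Labs/Lab_05/lab7d.py | editCsv
-- ===== SOURCE A (Python) =====
-- def editCsv(list_of_dicts): #Change the data in csv file
--     for row in list_of_dicts:
--         if row.get('First Name') == 'Christopher':
--             row['First Name'] = 'Chris'
--         if row.get('Last Name') == 'Patal':
--             row['Last Name'] = 'Patel'
--         if row.get('Last Name') == 'Smith':
--             row['Last Name'] = 'Nichols'
--         if row.get('Address') == '81 Vanier':
--             row['Address'] = '72 Princeton'
--         if row.get('Last Name') == 'Geary':
--             row['Address'] = '455 Bloor'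
--         if row.get('City') == 'North York':
--             row['City'] = 'Toronto'
--         if row.get('Country') == 'Canada':
--             row['Country'] = 'CA'
--     return list_of_dicts
-- ===== SOURCE B (Python) =====
-- # B: instead of a sequence of conditional in-place dict writes, compute each
-- # field's final value with one pure function of (key, old value, last name)
-- # and rebuild the row in a single pass; the only structural change A can make
-- # (adding an 'Address' key for a Geary row that has none) is one append.
-- # NOTE: A mutates the rows in place; B builds new dicts (same returned value).
--
-- def _fix(key, value, last_name):
--     if key == 'First Name' and value == 'Christopher':
--         return 'Chris'
--     if key == 'Last Name':
--         return {'Patal': 'Patel', 'Smith': 'Nichols'}.get(value, value)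
--     if key == 'Address':
--         if last_name == 'Geary':
--             return '455 Bloor'
--         if value == '81 Vanier':
--             return '72 Princeton'
--         return value
--     if key == 'City' and value == 'North York':
--         return 'Toronto'
--     if key == 'Country' and value == 'Canada':
--         return 'CA'
--     return value
--
-- def editCsv(list_of_dicts):
--     result = []
--     for row in list_of_dicts:
--         last_name = row.get('Last Name')
--         new_row = {k: _fix(k, v, last_name) for k, v in row.items()}
--         if last_name == 'Geary' and 'Address' not in row:
--             new_row['Address'] = '455 Bloor'
--         result.append(new_row)
--     return result
-- ===== Notes on version B (the rewrite author's own statement) =====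
-- stated objective: alternative
-- what changed: A applies seven ordered conditional in-place dict writes per row; B instead computes each field's final value with one pure function of (key, old value, last name) and rebuilds the row in a single pass, with one conditional append of the Address key for Geary rows lacking one.
import Mathlib
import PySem

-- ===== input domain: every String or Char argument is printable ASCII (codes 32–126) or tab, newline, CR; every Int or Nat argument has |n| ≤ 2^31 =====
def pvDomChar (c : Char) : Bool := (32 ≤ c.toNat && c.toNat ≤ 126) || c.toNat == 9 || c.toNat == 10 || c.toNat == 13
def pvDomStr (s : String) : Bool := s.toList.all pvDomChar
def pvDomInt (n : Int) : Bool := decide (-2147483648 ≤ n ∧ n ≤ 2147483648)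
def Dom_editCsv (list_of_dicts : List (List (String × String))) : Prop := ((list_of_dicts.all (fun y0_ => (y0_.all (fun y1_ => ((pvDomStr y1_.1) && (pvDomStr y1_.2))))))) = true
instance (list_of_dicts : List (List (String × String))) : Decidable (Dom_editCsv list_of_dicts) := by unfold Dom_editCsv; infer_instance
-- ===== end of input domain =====

-- B replaces A's seven ordered conditional in-place dict writes per row by one pure
-- per-field value function applied in a single rebuild pass (plus one conditional append
-- of a missing Address key); in Python A mutates the rows in place while B builds new
-- dicts — the equivalence proved here is about the returned value.

-- ===== PORT A =====
-- A-side helper: the per-row body of A's loop (seven conditional writes, in order).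
def editRowA (row : List (String × String)) : List (String × String) :=
  let d := PySem.Dict.ofList row
  let d := if d.get? "First Name" == some "Christopher" then d.insert "First Name" "Chris" else d
  let d := if d.get? "Last Name" == some "Patal" then d.insert "Last Name" "Patel" else d
  let d := if d.get? "Last Name" == some "Smith" then d.insert "Last Name" "Nichols" else d
  let d := if d.get? "Address" == some "81 Vanier" then d.insert "Address" "72 Princeton" else d
  let d := if d.get? "Last Name" == some "Geary" then d.insert "Address" "455 Bloor" else d
  let d := if d.get? "City" == some "North York" then d.insert "City" "Toronto" else d
  let d := if d.get? "Country" == some "Canada" then d.insert "Country" "CA" else d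
  d.items

def editCsv (list_of_dicts : List (List (String × String))) : List (List (String × String)) :=
  list_of_dicts.map editRowA

-- ===== PORT B =====
-- B-side helper: pure per-field final value (Source B's _fix).
def pvFix (key value : String) (lastName : Option String) : String :=
  if key == "First Name" && value == "Christopher" then "Chris"
  else if key == "Last Name" then
    (PySem.Dict.ofList [("Patal", "Patel"), ("Smith", "Nichols")]).getD value value
  else if key == "Address" then
    if lastName == some "Geary" then "455 Bloor"
    else if value == "81 Vanier" then "72 Princeton"
    else value
  else if key == "City" && value == "North York" then "Toronto"
  else if key == "Country" && value == "Canada" then "CA"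
  else value

def editCsv_alt (list_of_dicts : List (List (String × String))) : List (List (String × String)) :=
  list_of_dicts.map (fun row =>
    let d := PySem.Dict.ofList row
    let lastName := d.get? "Last Name"
    let newRow := d.items.map (fun p => (p.1, pvFix p.1 p.2 lastName))
    if lastName == some "Geary" && !(d.contains "Address") then
      newRow ++ [("Address", "455 Bloor")]
    else newRow)

-- ===== PRECONDITION & SPEC =====
def Spec_editCsv (list_of_dicts : List (List (String × String))) (out : List (List (String × String))) : Prop := out = editCsv_alt list_of_dicts
instance (list_of_dicts : List (List (String × String))) (out : List (List (String × String))) : Decidable (Spec_editCsv list_of_dicts out) := by unfold Spec_editCsv; infer_instance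

-- ===== CLAIM =====
def Claim_equal_editCsv : Prop := ∀ (list_of_dicts : List (List (String × String))), Dom_editCsv list_of_dicts → Spec_editCsv list_of_dicts (editCsv list_of_dicts)

-- ===== LEMMAS AND PROOFS =====
-- One conditional write of A: if d[key] == val then d[newKey] = newVal.
def stepA (key val newKey newVal : String) (d : PySem.Dict String String) :
    PySem.Dict String String :=
  if d.get? key == some val then d.insert newKey newVal else d

-- A's per-row chain, as the composition of its seven conditional writes.
def chainA (d : PySem.Dict String String) : PySem.Dict String String :=
  stepA "Country" "Canada" "Country" "CA" <|
    stepA "City" "North York" "City" "Toronto" <|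
      stepA "Last Name" "Geary" "Address" "455 Bloor" <|
        stepA "Address" "81 Vanier" "Address" "72 Princeton" <|
          stepA "Last Name" "Smith" "Last Name" "Nichols" <|
            stepA "Last Name" "Patal" "Last Name" "Patel" <|
              stepA "First Name" "Christopher" "First Name" "Chris" d

theorem editRowA_eq_chainA (row : List (String × String)) :
    editRowA row = (chainA (PySem.Dict.ofList row)).items := rfl

theorem get?_stepA_ne (key val newKey newVal : String) (d : PySem.Dict String String)
    (k' : String) (h : k' ≠ newKey) :
    (stepA key val newKey newVal d).get? k' = d.get? k' := by
  unfold stepA; split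
  · exact PySem.Dict.get?_insert_of_ne _ _ h
  · rfl

theorem nodup_stepA (key val newKey newVal : String) (d : PySem.Dict String String)
    (h : d.keys.Nodup) : (stepA key val newKey newVal d).keys.Nodup := by
  unfold stepA; split
  · exact PySem.Dict.nodup_keys_insert _ _ _ h
  · exact h

theorem keys_stepA_self (key val newVal : String) (d : PySem.Dict String String) :
    (stepA key val key newVal d).keys = d.keys := by
  unfold stepA; split
  · next h =>
    apply PySem.Dict.keys_insert_of_contains
    rw [PySem.Dict.contains_eq_isSome_get?, eq_of_beq h]
    rfl
  · rfl

theorem get?_stepA_self (key val newVal : String) (d : PySem.Dict String String) :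
    (stepA key val key newVal d).get? key =
      if d.get? key == some val then some newVal else d.get? key := by
  unfold stepA; split <;> simp_all [PySem.Dict.get?_insert_self]

theorem get?_stepA_other (key val newKey newVal : String) (d : PySem.Dict String String) :
    (stepA key val newKey newVal d).get? newKey =
      if d.get? key == some val then some newVal else d.get? newKey := by
  unfold stepA; split <;> simp_all [PySem.Dict.get?_insert_self]

theorem keys_stepA_other (key val newKey newVal : String) (d : PySem.Dict String String) :
    (stepA key val newKey newVal d).keys =
      if d.get? key == some val && !(d.contains newKey) then d.keys ++ [newKey]
      else d.keys := by
  unfold stepA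
  by_cases hf : d.get? key == some val
  · by_cases hc : d.contains newKey = true
    · simp [hf, hc, PySem.Dict.keys_insert_of_contains _ _ hc]
    · simp only [Bool.not_eq_true] at hc
      simp [hf, hc, PySem.Dict.keys_insert_of_not_contains _ _ hc]
  · simp [hf]

theorem chainA_nodup (d : PySem.Dict String String) (hnd : d.keys.Nodup) :
    (chainA d).keys.Nodup := by
  unfold chainA
  exact nodup_stepA _ _ _ _ _ (nodup_stepA _ _ _ _ _ (nodup_stepA _ _ _ _ _
    (nodup_stepA _ _ _ _ _ (nodup_stepA _ _ _ _ _ (nodup_stepA _ _ _ _ _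
      (nodup_stepA _ _ _ _ _ hnd))))))

-- The 'Last Name' value the Geary test sees, reduced to the original dict.
theorem lastname_at_geary (d : PySem.Dict String String) :
    ((stepA "Address" "81 Vanier" "Address" "72 Princeton" <|
        stepA "Last Name" "Smith" "Last Name" "Nichols" <|
          stepA "Last Name" "Patal" "Last Name" "Patel" <|
            stepA "First Name" "Christopher" "First Name" "Chris" d).get? "Last Name"
        == some "Geary") =
      (d.get? "Last Name" == some "Geary") := by
  rw [get?_stepA_ne _ _ _ _ _ _ (by decide), get?_stepA_self, get?_stepA_self,
    get?_stepA_ne _ _ _ _ _ _ (by decide)]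
  by_cases hp : d.get? "Last Name" = some "Patal" <;>
    by_cases hs : d.get? "Last Name" = some "Smith" <;>
      simp [hp, hs]

theorem keys_chain4 (d : PySem.Dict String String) :
    (stepA "Address" "81 Vanier" "Address" "72 Princeton" <|
        stepA "Last Name" "Smith" "Last Name" "Nichols" <|
          stepA "Last Name" "Patal" "Last Name" "Patel" <|
            stepA "First Name" "Christopher" "First Name" "Chris" d).keys = d.keys := by
  rw [keys_stepA_self, keys_stepA_self, keys_stepA_self, keys_stepA_self]

theorem contains_chain4 (d : PySem.Dict String String) :
    (stepA "Address" "81 Vanier" "Address" "72 Princeton" <|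
        stepA "Last Name" "Smith" "Last Name" "Nichols" <|
          stepA "Last Name" "Patal" "Last Name" "Patel" <|
            stepA "First Name" "Christopher" "First Name" "Chris" d).contains "Address" =
      d.contains "Address" := by
  rw [PySem.Dict.contains_eq_decide_mem_keys, PySem.Dict.contains_eq_decide_mem_keys,
    keys_chain4]

theorem chainA_keys (d : PySem.Dict String String) :
    (chainA d).keys =
      if d.get? "Last Name" == some "Geary" && !(d.contains "Address") then
        d.keys ++ ["Address"]
      else d.keys := by
  unfold chainA
  rw [keys_stepA_self, keys_stepA_self, keys_stepA_other _ _ _ _ _,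
    lastname_at_geary, contains_chain4, keys_chain4]

-- the literal replacement dict of Source B's _fix, unfolded
theorem pvFix_lastname (v : String) :
    pvFix "Last Name" v (d0 : Option String) =
      (if v = "Patal" then "Patel" else if v = "Smith" then "Nichols" else v) := by
  by_cases hp : v = "Patal" <;> by_cases hs : v = "Smith" <;>
    simp_all [pvFix, PySem.Dict.ofList, PySem.Dict.update, PySem.Dict.getD_insert, PySem.Dict.getD_empty]

theorem chainA_getD (d : PySem.Dict String String) (k : String) (v : String)
    (hv : d.get? k = some v) :
    (chainA d).getD k "" = pvFix k v (d.get? "Last Name") := by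
  have hgd : d.getD k "" = v := PySem.Dict.getD_of_get?_eq_some _ _ hv
  unfold chainA
  by_cases h1 : k = "First Name"
  · subst h1
    rw [PySem.Dict.getD_eq_get?_getD,
      get?_stepA_ne _ _ _ _ _ _ (by decide), get?_stepA_ne _ _ _ _ _ _ (by decide),
      get?_stepA_ne _ _ _ _ _ _ (by decide), get?_stepA_ne _ _ _ _ _ _ (by decide),
      get?_stepA_ne _ _ _ _ _ _ (by decide), get?_stepA_ne _ _ _ _ _ _ (by decide),
      get?_stepA_self, hv]
    by_cases hc : v = "Christopher" <;> simp [hc, pvFix]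
  by_cases h2 : k = "Last Name"
  · subst h2
    rw [PySem.Dict.getD_eq_get?_getD,
      get?_stepA_ne _ _ _ _ _ _ (by decide), get?_stepA_ne _ _ _ _ _ _ (by decide),
      get?_stepA_ne _ _ _ _ _ _ (by decide), get?_stepA_ne _ _ _ _ _ _ (by decide),
      get?_stepA_self, get?_stepA_self, get?_stepA_ne _ _ _ _ _ _ (by decide), hv,
      pvFix_lastname]
    by_cases hp : v = "Patal" <;> by_cases hs : v = "Smith" <;> simp_all
  by_cases h3 : k = "Address"
  · subst h3
    rw [PySem.Dict.getD_eq_get?_getD,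
      get?_stepA_ne _ _ _ _ _ _ (by decide), get?_stepA_ne _ _ _ _ _ _ (by decide)]
    rw [get?_stepA_other _ _ _ _ _, lastname_at_geary, get?_stepA_self,
      get?_stepA_ne _ _ _ _ _ _ (by decide), get?_stepA_ne _ _ _ _ _ _ (by decide),
      get?_stepA_ne _ _ _ _ _ _ (by decide), hv]
    by_cases hg : d.get? "Last Name" = some "Geary" <;>
      by_cases h81 : v = "81 Vanier" <;> simp_all [pvFix]
  by_cases h4 : k = "City"
  · subst h4
    rw [PySem.Dict.getD_eq_get?_getD, get?_stepA_ne _ _ _ _ _ _ (by decide),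
      get?_stepA_self,
      get?_stepA_ne _ _ _ _ _ _ (by decide), get?_stepA_ne _ _ _ _ _ _ (by decide),
      get?_stepA_ne _ _ _ _ _ _ (by decide), get?_stepA_ne _ _ _ _ _ _ (by decide),
      get?_stepA_ne _ _ _ _ _ _ (by decide), hv]
    by_cases hc : v = "North York" <;> simp [hc, pvFix]
  by_cases h5 : k = "Country"
  · subst h5
    rw [PySem.Dict.getD_eq_get?_getD, get?_stepA_self,
      get?_stepA_ne _ _ _ _ _ _ (by decide), get?_stepA_ne _ _ _ _ _ _ (by decide),
      get?_stepA_ne _ _ _ _ _ _ (by decide), get?_stepA_ne _ _ _ _ _ _ (by decide),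
      get?_stepA_ne _ _ _ _ _ _ (by decide), get?_stepA_ne _ _ _ _ _ _ (by decide), hv]
    by_cases hc : v = "Canada" <;> simp [hc, pvFix]
  · rw [PySem.Dict.getD_eq_get?_getD,
      get?_stepA_ne _ _ _ _ _ _ h5, get?_stepA_ne _ _ _ _ _ _ h4,
      get?_stepA_ne _ _ _ _ _ _ h3, get?_stepA_ne _ _ _ _ _ _ h3,
      get?_stepA_ne _ _ _ _ _ _ h2, get?_stepA_ne _ _ _ _ _ _ h2,
      get?_stepA_ne _ _ _ _ _ _ h1, hv]
    simp [pvFix, h1, h2, h3, h4, h5]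

theorem chainA_getD_new (d : PySem.Dict String String)
    (hg : d.get? "Last Name" = some "Geary") (hc : d.contains "Address" = false) :
    (chainA d).getD "Address" "" = "455 Bloor" := by
  have hn : d.get? "Address" = none := (PySem.Dict.get?_eq_none_iff_contains d _).mpr hc
  unfold chainA
  rw [PySem.Dict.getD_eq_get?_getD, get?_stepA_ne _ _ _ _ _ _ (by decide),
    get?_stepA_ne _ _ _ _ _ _ (by decide), get?_stepA_other _ _ _ _ _, lastname_at_geary,
    get?_stepA_self, get?_stepA_ne _ _ _ _ _ _ (by decide),
    get?_stepA_ne _ _ _ _ _ _ (by decide), get?_stepA_ne _ _ _ _ _ _ (by decide),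
    hn, hg]
  simp

theorem chainA_getD_mem (d : PySem.Dict String String) (k : String) (hk : k ∈ d.keys) :
    (chainA d).getD k "" = pvFix k (d.getD k "") (d.get? "Last Name") := by
  have hs : (d.get? k).isSome := by
    rw [← PySem.Dict.contains_eq_isSome_get?]
    exact (PySem.Dict.contains_iff_mem_keys d k).mpr hk
  obtain ⟨v, hv⟩ := Option.isSome_iff_exists.mp hs
  rw [PySem.Dict.getD_of_get?_eq_some _ _ hv, chainA_getD d k v hv]

theorem editRow_eq (row : List (String × String)) :
    editRowA row =
      (let d := PySem.Dict.ofList row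
       let lastName := d.get? "Last Name"
       let newRow := d.items.map (fun p => (p.1, pvFix p.1 p.2 lastName))
       if lastName == some "Geary" && !(d.contains "Address") then
         newRow ++ [("Address", "455 Bloor")]
       else newRow) := by
  dsimp only
  rw [editRowA_eq_chainA,
    PySem.Dict.items_eq_map_keys _ (chainA_nodup _ (PySem.Dict.nodup_keys_ofList row)) "",
    chainA_keys, PySem.Dict.items_eq_map_keys _ (PySem.Dict.nodup_keys_ofList row) "",
    List.map_map]
  by_cases hb : ((PySem.Dict.ofList row : PySem.Dict String String).get? "Last Name"
      == some "Geary" && !((PySem.Dict.ofList row : PySem.Dict String String).contains "Address")) = true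
  · obtain ⟨hg, hc⟩ := Bool.and_eq_true_iff.mp hb
    rw [hb, if_pos rfl, if_pos rfl, List.map_append]
    congr 1
    · exact List.map_congr_left fun k hk => by
        simp only [Function.comp_apply, chainA_getD_mem _ k hk]
    · simp only [List.map_cons, List.map_nil]
      rw [chainA_getD_new _ (eq_of_beq hg)
        (by simpa using hc)]
  · rw [if_neg (by simpa using hb), if_neg (by simpa using hb)]
    exact List.map_congr_left fun k hk => by
      simp only [Function.comp_apply, chainA_getD_mem _ k hk]

-- ===== VERDICT =====
theorem editCsv_spec : Claim_equal_editCsv := by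
  intro l _
  unfold Spec_editCsv editCsv editCsv_alt
  exact List.map_congr_left fun row _ => editRow_eq row
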